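-- pv_equiv track=rewrite | github.com/gudals113/Algorithms | boj/String/boj-1013.py | check
-- ===== SOURCE A (Python) =====
-- def check(TC):
--     idx=0
--     status='0'
--
--     while True:
--         if status=='0':
--             if idx==len(TC):
--                 return -1
--
--             if TC[idx]==status :
--                 idx+=1
--             else:
--                 idx+=1
--                 status='1'
--
--         else :
--             if idx==len(TC):
--                 return idx
--
--             if TC[idx]==status:
--                 idx+=1
--
--             else:
--
--                 if TC[idx-2:idx+2]=='1100':
--                     return idx-1
--
--                 else :
--                     return idx
-- ===== SOURCE B (Python) =====
-- def check(TC):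
--     rest = TC.lstrip('0')
--     if not rest:
--         return -1
--     skip = len(TC) - len(rest) + 1
--     tail = TC[skip:].lstrip('1')
--     idx = len(TC) - len(tail)
--     if idx == len(TC):
--         return idx
--     return idx - 1 if TC[idx-2:idx+2] == '1100' else idx
-- ===== Notes on version B (the rewrite author's own statement) =====
-- stated objective: idiomatic
-- what changed: Replaces A's while-True status-flag state machine with a loop-free formulation: two lstrip calls compute the boundary indices by length arithmetic, then one slice test decides the result.
import Mathlib
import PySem

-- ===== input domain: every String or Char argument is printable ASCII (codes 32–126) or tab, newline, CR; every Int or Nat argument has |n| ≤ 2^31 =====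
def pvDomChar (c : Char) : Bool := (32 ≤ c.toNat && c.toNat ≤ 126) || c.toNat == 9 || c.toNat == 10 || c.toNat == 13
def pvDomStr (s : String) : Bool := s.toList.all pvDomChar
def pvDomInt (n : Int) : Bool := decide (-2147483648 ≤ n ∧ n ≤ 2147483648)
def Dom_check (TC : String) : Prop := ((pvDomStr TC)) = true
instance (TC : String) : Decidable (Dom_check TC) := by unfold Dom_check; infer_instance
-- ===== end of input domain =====

-- B replaces A's while-True status-flag state machine by a loop-free formulation (two lstrips + length arithmetic); same return value.

-- cited by port A's termination proof
theorem lt_of_some (l : List Char) (i : Nat) (c : Char) (h : l[i]? = some c) : i < l.length := by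
  have h2 : l[i]?.isSome := by rw [h]; rfl
  simpa using h2

-- ===== PORT A =====
-- A's while-True loop with mutable idx/status, one recursive call per iteration;
-- TC[idx] == status (idx always in range when reached) is ported as l[idx]? = some status
def checkLoop (l : List Char) (idx : Nat) (status : Char) : Int :=
  if status = '0' then
    if idx = l.length then -1
    else if l[idx]? = some status then checkLoop l (idx + 1) '0'
    else checkLoop l (idx + 1) '1'
  else
    if idx = l.length then (idx : Int)
    else if l[idx]? = some status then checkLoop l (idx + 1) '1'
    else if PySem.List.slice l (some ((idx : Int) - 2)) (some ((idx : Int) + 2)) = ['1','1','0','0']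
      then (idx : Int) - 1
    else (idx : Int)
termination_by ((l.length - idx), (if status = '0' then 1 else 0))
decreasing_by
  · have := lt_of_some _ _ _ ‹l[idx]? = some status›
    apply Prod.Lex.left; omega
  · rcases Nat.lt_or_ge idx l.length with h | h
    · apply Prod.Lex.left; omega
    · have : l.length - (idx + 1) = l.length - idx := by omega
      rw [this]; apply Prod.Lex.right; simp_all
  · have := lt_of_some _ _ _ ‹l[idx]? = some status›
    apply Prod.Lex.left; omega

def check (TC : String) : Int := checkLoop TC.toList 0 '0'

-- ===== PORT B =====
-- Source B: rest = TC.lstrip('0'); skip = len-len(rest)+1; tail = TC[skip:].lstrip('1');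
-- idx = len-len(tail); then the final slice test. lstrip('c') is dropWhile (· == c).
def check_alt (TC : String) : Int :=
  let l := TC.toList
  let rest := l.dropWhile (· == '0')
  if rest = [] then -1
  else
    let skip := l.length - rest.length + 1
    let tail := (PySem.List.slice l (some (skip : Int)) none).dropWhile (· == '1')
    let idx := l.length - tail.length
    if idx = l.length then (idx : Int)
    else if PySem.List.slice l (some ((idx : Int) - 2)) (some ((idx : Int) + 2)) = ['1','1','0','0']
      then (idx : Int) - 1
    else (idx : Int)

-- ===== PRECONDITION & SPEC =====
def Spec_check (TC : String) (out : Int) : Prop := out = check_alt TC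
instance (TC : String) (out : Int) : Decidable (Spec_check TC out) := by unfold Spec_check; infer_instance

-- ===== CLAIM =====
def Claim_equal_check : Prop := ∀ (TC : String), Dom_check TC → Spec_check TC (check TC)

-- ===== LEMMAS AND PROOFS =====

-- proof-side model of one 'skip all c from j' phase of A's state machine
def skipCh (c : Char) (l : List Char) (j : Nat) : Nat :=
  if j < l.length ∧ l[j]? = some c then skipCh c l (j + 1) else j
termination_by l.length - j
decreasing_by omega

theorem skipCh_eq (c : Char) (l : List Char) (j : Nat) (hj : j ≤ l.length) :
    skipCh c l j = l.length - ((l.drop j).dropWhile (· == c)).length := by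
  induction j using skipCh.induct c l with
  | case1 j h ih =>
    obtain ⟨hlt, hget⟩ := h
    have hd : l.drop j = c :: l.drop (j + 1) := by
      have := List.getElem_cons_drop (as := l) hlt
      rw [← this]
      congr 1
      have : l[j]? = some l[j] := List.getElem?_eq_getElem hlt
      rw [this] at hget; exact Option.some.inj hget
    rw [skipCh, if_pos ⟨hlt, hget⟩, hd, List.dropWhile_cons_of_pos (by simp)]
    exact ih (by omega)
  | case2 j h =>
    rw [skipCh, if_neg h]
    by_cases hlen : j = l.length
    · subst hlen; simp
    · have hlt : j < l.length := by omega
      have hget : ¬ l[j]? = some c := fun hg => h ⟨hlt, hg⟩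
      have hd : l.drop j = l[j] :: l.drop (j + 1) := (List.getElem_cons_drop hlt).symm
      have hne : ¬ (l[j] == c) = true := by
        intro hb
        exact hget (by rw [List.getElem?_eq_getElem hlt, beq_iff_eq.mp hb])
      rw [hd, List.dropWhile_cons_of_neg (by simpa using hne)]
      have : (l.drop (j + 1)).length = l.length - (j + 1) := List.length_drop
      simp only [List.length_cons, this]
      omega

-- A's status-'1' phase computes B's tail test starting from index j
theorem onePhase (l : List Char) (j : Nat) :
    checkLoop l j '1' =
      (let idx := skipCh '1' l j
       if idx = l.length then (idx : Int)
       else if PySem.List.slice l (some ((idx : Int) - 2)) (some ((idx : Int) + 2)) = ['1','1','0','0']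
         then (idx : Int) - 1
       else (idx : Int)) := by
  induction j using skipCh.induct '1' l with
  | case1 j h ih =>
    obtain ⟨hlt, hget⟩ := h
    have hs : skipCh '1' l j = skipCh '1' l (j + 1) := by
      rw [skipCh, if_pos ⟨hlt, hget⟩]
    rw [checkLoop, hs, if_neg (by decide : ¬ ('1' : Char) = '0'),
      if_neg (by omega : ¬ j = l.length), if_pos hget]
    exact ih
  | case2 j h =>
    have hs : skipCh '1' l j = j := by rw [skipCh, if_neg h]
    rw [checkLoop, hs, if_neg (by decide : ¬ ('1' : Char) = '0')]
    by_cases hj : j = l.length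
    · simp [hj]
    · have hget : ¬ l[j]? = some '1' := fun hg => h ⟨lt_of_some _ _ _ hg, hg⟩
      rw [if_neg hj, if_neg hget]
      simp [hj]

-- A's status-'0' phase skips zeros, then either returns -1 or enters the '1' phase
theorem zeroPhase (l : List Char) (j : Nat) :
    checkLoop l j '0' =
      (let j' := skipCh '0' l j
       if j' = l.length then -1 else checkLoop l (j' + 1) '1') := by
  induction j using skipCh.induct '0' l with
  | case1 j h ih =>
    obtain ⟨hlt, hget⟩ := h
    have hs : skipCh '0' l j = skipCh '0' l (j + 1) := by
      rw [skipCh, if_pos ⟨hlt, hget⟩]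
    rw [checkLoop, hs, if_pos rfl, if_neg (by omega : ¬ j = l.length), if_pos hget]
    exact ih
  | case2 j h =>
    have hs : skipCh '0' l j = j := by rw [skipCh, if_neg h]
    rw [checkLoop, hs, if_pos rfl]
    by_cases hj : j = l.length
    · simp [hj]
    · have hget : ¬ l[j]? = some '0' := fun hg => h ⟨lt_of_some _ _ _ hg, hg⟩
      rw [if_neg hj, if_neg hget]
      simp [hj]

-- ===== VERDICT =====
theorem check_spec : Claim_equal_check := by
  intro TC _
  show check TC = check_alt TC
  rw [check, check_alt]
  set l := TC.toList with hl
  simp only [zeroPhase]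
  have h0 : skipCh '0' l 0 = l.length - (l.dropWhile (· == '0')).length := by
    simpa using skipCh_eq '0' l 0 (by omega)
  have hrlen : (l.dropWhile (· == '0')).length ≤ l.length := by
    simpa using List.length_dropWhile_le (p := (· == '0')) (l := l)
  by_cases hrest : l.dropWhile (· == '0') = []
  · have : skipCh '0' l 0 = l.length := by rw [h0, hrest]; simp
    simp [this, hrest]
  · have hpos : 0 < (l.dropWhile (· == '0')).length := List.length_pos_of_ne_nil hrest
    have hne : ¬ skipCh '0' l 0 = l.length := by omega
    rw [if_neg (by simp only [h0]; omega), if_neg hrest]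
    simp only [onePhase]
    have hskip : l.length - (l.dropWhile (· == '0')).length + 1 = skipCh '0' l 0 + 1 := by
      omega
    rw [hskip, PySem.List.slice_from_natCast]
    have h1 : skipCh '1' l (skipCh '0' l 0 + 1) =
        l.length - ((l.drop (skipCh '0' l 0 + 1)).dropWhile (· == '1')).length := by
      exact skipCh_eq '1' l _ (by omega)
    rw [h1]
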